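-- pv_equiv track=rewrite | github.com/dereklavigne18/adventofcode | advent2020/questions/seating_system.py | _validate_grid
-- ===== SOURCE A (Python) =====
-- from typing import List, Optional
--
-- EMPTY_SEAT = "L"
--
-- OCCUPIED_SEAT = "#"
--
-- FLOOR = "."
--
-- def _validate_grid(grid: List[List[str]]) -> bool:
--     if len(grid) < 1:
--         return False
--
--     width = len(grid[0])
--     if width < 1:
--         return False
--
--     for row in grid:
--         if len(row) != width:
--             return False
--
--         for cell in row:
--             if cell not in [EMPTY_SEAT, OCCUPIED_SEAT, FLOOR]:
--                 return False
--
--     return True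
-- ===== SOURCE B (Python) =====
-- from typing import List
--
-- EMPTY_SEAT = "L"
-- OCCUPIED_SEAT = "#"
-- FLOOR = "."
--
-- def _validate_grid(grid: List[List[str]]) -> bool:
--     # Counting formulation: the grid is valid iff the set of row lengths is exactly
--     # {width} with width >= 1, and the tally of the three allowed symbols in the
--     # flattened grid accounts for every cell.
--     if not grid:
--         return False
--     width = len(grid[0])
--     if width < 1 or set(map(len, grid)) != {width}:
--         return False
--     flat = [cell for row in grid for cell in row]
--     return flat.count(EMPTY_SEAT) + flat.count(OCCUPIED_SEAT) + flat.count(FLOOR) == len(flat)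
-- ===== Notes on version B (the rewrite author's own statement) =====
-- stated objective: alternative
-- what changed: Replaces A's nested early-exit membership scan by a counting formulation: row-length consistency checked as set(map(len,grid)) == {width}, and cell validity checked by tallying occurrences of the three allowed symbols in the flattened grid and comparing the total to the number of cells.
import Mathlib
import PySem

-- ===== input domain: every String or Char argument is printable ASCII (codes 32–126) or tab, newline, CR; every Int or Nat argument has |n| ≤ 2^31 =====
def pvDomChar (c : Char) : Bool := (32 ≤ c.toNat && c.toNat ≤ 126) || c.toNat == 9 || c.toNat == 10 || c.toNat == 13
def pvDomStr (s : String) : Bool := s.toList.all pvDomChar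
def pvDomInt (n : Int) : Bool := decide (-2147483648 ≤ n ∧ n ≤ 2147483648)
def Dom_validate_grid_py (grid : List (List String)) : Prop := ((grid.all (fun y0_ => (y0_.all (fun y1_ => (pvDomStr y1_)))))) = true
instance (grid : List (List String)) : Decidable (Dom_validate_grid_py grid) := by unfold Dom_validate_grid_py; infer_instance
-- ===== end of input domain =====

-- B validates by counting: row-length consistency as set(map(len,grid)) == {width} and cell
-- validity by tallying the three allowed symbols over the flattened grid (objective: alternative).

-- ===== PORT A =====
-- inner loop of A: 'for cell in row: if cell not in [EMPTY_SEAT, OCCUPIED_SEAT, FLOOR]: return False'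
def pvCellsA : List String → Bool
  | [] => true
  | c :: cs => if !(c == "L" || c == "#" || c == ".") then false else pvCellsA cs

-- outer loop of A: 'for row in grid: if len(row) != width: return False; <inner loop>'
def pvRowsA (width : Int) : List (List String) → Bool
  | [] => true
  | r :: rs =>
    if PySem.List.len r ≠ width then false
    else if pvCellsA r = false then false
    else pvRowsA width rs

def validate_grid_py (grid : List (List String)) : Bool :=
  if PySem.List.len grid < 1 then false
  else
    let width := PySem.List.len (PySem.List.pyGetD grid 0 [])
    if width < 1 then false
    else pvRowsA width grid

-- ===== PORT B =====
def validate_grid_py_alt (grid : List (List String)) : Bool :=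
  if grid = [] then false
  else
    let width := PySem.List.len (PySem.List.pyGetD grid 0 [])
    -- 'width < 1 or set(map(len, grid)) != {width}'
    if width < 1 ||
        !PySem.Set.equal (PySem.Set.ofList (grid.map PySem.List.len)) (PySem.Set.ofList [width]) then
      false
    else
      -- flat = [cell for row in grid for cell in row]
      let flat := grid.flatten
      -- flat.count("L") + flat.count("#") + flat.count(".") == len(flat)
      decide ((PySem.List.count flat "L" : Int) + PySem.List.count flat "#" + PySem.List.count flat "."
                = PySem.List.len flat)

-- ===== PRECONDITION & SPEC =====
def Spec_validate_grid_py (grid : List (List String)) (out : Bool) : Prop := out = validate_grid_py_alt grid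
instance (grid : List (List String)) (out : Bool) : Decidable (Spec_validate_grid_py grid out) := by unfold Spec_validate_grid_py; infer_instance

-- ===== CLAIM (what is proved, stated in full; the proofs are below) =====
def Claim_equal_validate_grid_py : Prop := ∀ (grid : List (List String)), Dom_validate_grid_py grid → Spec_validate_grid_py grid (validate_grid_py grid)

-- ===== LEMMAS AND PROOFS =====

lemma pvCellsA_eq_all (r : List String) :
    pvCellsA r = r.all (fun c => c == "L" || c == "#" || c == ".") := by
  induction r with
  | nil => rfl
  | cons c cs ih =>
    simp only [pvCellsA, List.all_cons, ih]
    by_cases h : (c == "L" || c == "#" || c == ".") = true <;> simp [h]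

lemma pvRowsA_eq_all (width : Int) (g : List (List String)) :
    pvRowsA width g = g.all (fun r => decide (PySem.List.len r = width) && pvCellsA r) := by
  induction g with
  | nil => rfl
  | cons r rs ih =>
    simp only [pvRowsA, List.all_cons, ih]
    by_cases h : (r.length : Int) = width
    · by_cases hc : pvCellsA r = false <;>
        simp [PySem.List.len_eq, h, hc]
    · simp [PySem.List.len_eq, h]

-- the three-symbol tally accounts for every element iff every element is one of the three symbols
lemma count3_eq_countP (l : List String) :
    l.count "L" + l.count "#" + l.count "." = l.countP (fun c => c == "L" || c == "#" || c == ".") := by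
  induction l with
  | nil => simp
  | cons c cs ih =>
    simp only [List.count_cons, List.countP_cons]
    by_cases hL : c = "L" <;> by_cases hH : c = "#" <;> by_cases hD : c = "." <;>
      simp [hL, hH, hD] <;> omega

-- the three-symbol tally accounts for every element iff every element is one of the three symbols
lemma count3_eq_len_iff (l : List String) :
    ((PySem.List.count l "L" : Int) + PySem.List.count l "#" + PySem.List.count l "." = l.length)
      ↔ ∀ c ∈ l, c = "L" ∨ c = "#" ∨ c = "." := by
  simp only [PySem.List.count_eq]
  rw [show ((l.count "L" : Int) + l.count "#" + l.count "." = l.length)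
        ↔ (l.count "L" + l.count "#" + l.count "." = l.length) by omega]
  rw [count3_eq_countP, List.countP_eq_length]
  simp [or_assoc]

-- set(map(len, grid)) == {len(grid[0])} says exactly: every row has length len(grid[0])
lemma set_equal_iff (g0 : List String) (gs : List (List String)) :
    PySem.Set.equal (PySem.Set.ofList ((g0 :: gs).map PySem.List.len))
        (PySem.Set.ofList [PySem.List.len g0]) = true
      ↔ ∀ r ∈ g0 :: gs, PySem.List.len r = PySem.List.len g0 := by
  rw [PySem.Set.equal_iff]
  simp only [PySem.Set.mem_ofList, List.mem_map, List.mem_cons]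
  constructor
  · intro h r hr
    rcases (h (PySem.List.len r)).mp ⟨r, hr, rfl⟩ with h' | h'
    · exact h'
    · simp at h'
  · intro h x
    constructor
    · rintro ⟨r, hr, rfl⟩; exact Or.inl (h r hr)
    · rintro (rfl | hx)
      · exact ⟨g0, Or.inl rfl, rfl⟩
      · simp at hx

-- ===== VERDICT (by name: the statement is the Claim_ definition above) =====
theorem validate_grid_py_spec : Claim_equal_validate_grid_py := by
  intro grid _
  unfold Spec_validate_grid_py validate_grid_py validate_grid_py_alt
  cases grid with
  | nil => rfl
  | cons g0 gs =>
    have hnil : (g0 :: gs : List (List String)) ≠ [] := by simp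
    have hlen : ¬ PySem.List.len (g0 :: gs) < 1 := by
      simp only [PySem.List.len_eq, List.length_cons]; push_cast; omega
    have hg : PySem.List.pyGetD (g0 :: gs) (0 : Int) ([] : List String) = g0 := by
      simp [pysem]
    rw [if_neg hlen, if_neg hnil, hg]
    have hSE := set_equal_iff g0 gs
    simp only [PySem.List.len_eq, List.map_cons, List.mem_cons] at hSE ⊢
    by_cases hwid : (g0.length : Int) < 1
    · rw [if_pos hwid, if_pos (by rw [Bool.or_eq_true, decide_eq_true_eq]; exact Or.inl hwid)]
    · rw [if_neg hwid]
      by_cases heq : PySem.Set.equal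
          (PySem.Set.ofList ((g0.length : Int) :: gs.map PySem.List.len))
          (PySem.Set.ofList [(g0.length : Int)]) = true
      · -- widths all equal: B's guard passes; compare A's scan with B's tally
        have hall := hSE.mp heq
        rw [if_neg (by simp [hwid, heq])]
        rw [pvRowsA_eq_all, Bool.eq_iff_iff]
        simp only [List.all_eq_true, Bool.and_eq_true, decide_eq_true_eq, PySem.List.len_eq,
          count3_eq_len_iff]
        constructor
        · intro h c hc
          rw [List.mem_flatten] at hc
          obtain ⟨r, hr, hcr⟩ := hc
          have h2 := (h r hr).2
          rw [pvCellsA_eq_all] at h2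
          simp only [List.all_eq_true, Bool.or_eq_true, beq_iff_eq] at h2
          have := h2 c hcr; tauto
        · intro h r hr
          refine ⟨by have := hall r (List.mem_cons.mp hr); exact_mod_cast this, ?_⟩
          rw [pvCellsA_eq_all]
          simp only [List.all_eq_true, Bool.or_eq_true, beq_iff_eq]
          intro c hcr
          have := h c (List.mem_flatten.mpr ⟨r, hr, hcr⟩); tauto
      · -- some row length differs: A's scan hits it; B's set test fails
        rw [if_pos (by simp [heq]), pvRowsA_eq_all]
        have : ∃ r, (r = g0 ∨ r ∈ gs) ∧ PySem.List.len r ≠ (g0.length : Int) := by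
          by_contra hc
          push Not at hc
          exact heq (hSE.mpr (fun r hr => hc r hr))
        obtain ⟨r, hr, hne⟩ := this
        simp only [List.all_eq_false]
        have hne' : r.length ≠ g0.length := fun hc => hne (by simp [PySem.List.len_eq, hc])
        exact ⟨r, List.mem_cons.mpr hr, by simp [hne']⟩
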